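-- pv_equiv track=rewrite | github.com/chiggum/dibo | src/prelims/utils.py | get_byte_to_note_map
-- ===== SOURCE A (Python) =====
-- def get_byte_to_note_map(keys = ['a','b','c','d','e','f','g'],
--                         levels = ['','#'],
--                         octaves = ['1','2','3','4','5','6','7'],
--                         intensities = ['','*'],
--                         max_cnt = 255):
--     byte_to_note_map = {}
--     cnt = 0
--     max_byte_int = 0
--     for elem1 in keys:
--         for elem2 in levels:
--             for elem3 in octaves:
--                 for elem4 in intensities:
--                     mynote = elem1+elem2+elem3+elem4
--                     mybyte = "%02x" % ord((cnt).to_bytes(1,'big'))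
--                     byte_to_note_map[mybyte] = mynote
--                     cnt += 1
--     max_byte_int = cnt
--     while cnt <= max_cnt:
--         mybyte = "%02x" % ord((cnt).to_bytes(1,'big'))
--         mybyte2 = "%02x" % ord((cnt%max_byte_int).to_bytes(1,'big'))
--         byte_to_note_map[mybyte] = byte_to_note_map[mybyte2]
--         cnt += 1
--     return byte_to_note_map
-- ===== SOURCE B (Python) =====
-- def get_byte_to_note_map(keys = ['a','b','c','d','e','f','g'],
--                         levels = ['','#'],
--                         octaves = ['1','2','3','4','5','6','7'],
--                         intensities = ['','*'],
--                         max_cnt = 255):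
--     nk, nl, no, ni = len(keys), len(levels), len(octaves), len(intensities)
--     n = nk * nl * no * ni
--     byte_to_note_map = {}
--     for c in range(max(max_cnt + 1, n)):
--         j = c % n
--         i4 = j % ni; j = j // ni
--         i3 = j % no; j = j // no
--         i2 = j % nl; i1 = j // nl
--         byte_to_note_map["%02x" % ord((c).to_bytes(1, 'big'))] = \
--             keys[i1] + levels[i2] + octaves[i3] + intensities[i4]
--     return byte_to_note_map
-- ===== Notes on version B (the rewrite author's own statement) =====
-- stated objective: alternative
-- what changed: B never materializes the note list or reads the dict back: it computes each counter's note directly by mixed-radix div/mod decoding of the counter into four component indices into the input lists, in one uniform loop, whereas A enumerates the 4-deep product into the dict and then copies wrapped entries out of the dict under construction.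
import Mathlib
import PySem

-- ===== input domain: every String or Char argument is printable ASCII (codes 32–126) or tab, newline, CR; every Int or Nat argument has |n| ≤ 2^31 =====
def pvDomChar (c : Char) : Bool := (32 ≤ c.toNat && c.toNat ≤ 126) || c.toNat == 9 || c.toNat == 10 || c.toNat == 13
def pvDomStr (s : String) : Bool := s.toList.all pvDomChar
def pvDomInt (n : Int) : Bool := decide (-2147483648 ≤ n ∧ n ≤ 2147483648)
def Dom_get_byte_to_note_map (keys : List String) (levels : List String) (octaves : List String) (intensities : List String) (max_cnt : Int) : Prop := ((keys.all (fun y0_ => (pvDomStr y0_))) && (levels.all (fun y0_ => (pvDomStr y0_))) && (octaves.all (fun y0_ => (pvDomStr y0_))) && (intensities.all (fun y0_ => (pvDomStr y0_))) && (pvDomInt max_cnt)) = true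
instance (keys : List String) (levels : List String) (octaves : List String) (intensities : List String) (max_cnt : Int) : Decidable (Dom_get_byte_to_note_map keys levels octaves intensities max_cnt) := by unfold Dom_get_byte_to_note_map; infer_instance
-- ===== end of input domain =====

-- B never builds the note list or reads the dict back: each counter's note is computed directly
-- by mixed-radix div/mod decoding of the counter into four indices into the input lists
-- (one uniform loop); an alternative algorithm of the same cost.

-- shared helper for '"%02x" % ord((cnt).to_bytes(1, "big"))' — exact for 0 ≤ c ≤ 255
-- (to_bytes raises OverflowError outside that range; those inputs are excluded by Pre_).
def pvHexDigit (n : Int) : Char := if n < 10 then Char.ofNat (48 + n.toNat) else Char.ofNat (87 + n.toNat)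
def pvByteHex (c : Int) : String := String.ofList [pvHexDigit (PySem.Int.floordiv c 16), pvHexDigit (PySem.Int.mod c 16)]

-- ===== PORT A =====
-- literal transliteration of A; 'byte_to_note_map[mybyte2]' is ported as getD "" — under
-- Pre_ the looked-up key is always present (KeyError cannot fire there).
def get_byte_to_note_map (keys : List String) (levels : List String) (octaves : List String) (intensities : List String) (max_cnt : Int) : List (String × String) :=
  let s := keys.foldl (fun s elem1 =>
    levels.foldl (fun s elem2 =>
      octaves.foldl (fun s elem3 =>
        intensities.foldl (fun s elem4 =>
          (s.1.insert (pvByteHex s.2) (elem1 ++ elem2 ++ elem3 ++ elem4), s.2 + 1)) s) s) s)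
    ((PySem.Dict.empty : PySem.Dict String String), (0 : Int))
  let max_byte_int := s.2
  let d := (PySem.List.pyRange s.2 (max_cnt + 1) 1).foldl (fun d cnt =>
      d.insert (pvByteHex cnt) (d.getD (pvByteHex (PySem.Int.mod cnt max_byte_int)) "")) s.1
  d.items

-- ===== PORT B =====
-- loop body of Source B: mixed-radix decode of counter c modulo n into the four component indices;
-- 'keys[i1]' etc. are ported as (pyGet? …).getD "" — under Pre_ every index is in range
-- (IndexError cannot fire there).
def pvDecodeNote (keys : List String) (levels : List String) (octaves : List String) (intensities : List String) (n : Int) (c : Int) : String :=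
  let j0 := PySem.Int.mod c n
  let i4 := PySem.Int.mod j0 (intensities.length : Int)
  let j1 := PySem.Int.floordiv j0 (intensities.length : Int)
  let i3 := PySem.Int.mod j1 (octaves.length : Int)
  let j2 := PySem.Int.floordiv j1 (octaves.length : Int)
  let i2 := PySem.Int.mod j2 (levels.length : Int)
  let i1 := PySem.Int.floordiv j2 (levels.length : Int)
  ((PySem.List.pyGet? keys i1).getD "") ++ ((PySem.List.pyGet? levels i2).getD "") ++
  ((PySem.List.pyGet? octaves i3).getD "") ++ ((PySem.List.pyGet? intensities i4).getD "")

-- literal transliteration of Source B: one fold over range(max(max_cnt+1, n)) inserting the decoded note.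
def get_byte_to_note_map_alt (keys : List String) (levels : List String) (octaves : List String) (intensities : List String) (max_cnt : Int) : List (String × String) :=
  let n : Int := (keys.length : Int) * (levels.length : Int) * (octaves.length : Int) * (intensities.length : Int)
  let top := max (max_cnt + 1) n
  ((PySem.List.pyRange 0 top 1).foldl (fun d c =>
      d.insert (pvByteHex c) (pvDecodeNote keys levels octaves intensities n c))
    (PySem.Dict.empty : PySem.Dict String String)).items

-- ===== PRECONDITION & SPEC =====
-- Pre_ is exactly where the Python A returns: with N the product of the four list lengths,
-- A raises OverflowError as soon as its counter reaches 256 (hence N ≤ 256 and max_cnt ≤ 255)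
-- and ZeroDivisionError when N = 0 and the while loop runs (max_cnt ≥ 0).
def Pre_get_byte_to_note_map (keys : List String) (levels : List String) (octaves : List String) (intensities : List String) (max_cnt : Int) : Prop :=
  keys.length * levels.length * octaves.length * intensities.length ≤ 256 ∧
  max_cnt ≤ 255 ∧
  (0 < keys.length * levels.length * octaves.length * intensities.length ∨ max_cnt < 0)
instance (keys : List String) (levels : List String) (octaves : List String) (intensities : List String) (max_cnt : Int) : Decidable (Pre_get_byte_to_note_map keys levels octaves intensities max_cnt) := by unfold Pre_get_byte_to_note_map; infer_instance

def pvWitness_get_byte_to_note_map : List String × List String × List String × List String × Int :=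
  (["a", "b"], ["", "#"], ["1"], [""], 7)

def Spec_get_byte_to_note_map (keys : List String) (levels : List String) (octaves : List String) (intensities : List String) (max_cnt : Int) (out : List (String × String)) : Prop := out = get_byte_to_note_map_alt keys levels octaves intensities max_cnt
instance (keys : List String) (levels : List String) (octaves : List String) (intensities : List String) (max_cnt : Int) (out : List (String × String)) : Decidable (Spec_get_byte_to_note_map keys levels octaves intensities max_cnt out) := by unfold Spec_get_byte_to_note_map; infer_instance

-- ===== CLAIM (what is proved, stated in full; the proofs are below) =====
def Claim_equal_get_byte_to_note_map : Prop := ∀ (keys : List String) (levels : List String) (octaves : List String) (intensities : List String) (max_cnt : Int), Dom_get_byte_to_note_map keys levels octaves intensities max_cnt → Pre_get_byte_to_note_map keys levels octaves intensities max_cnt → Spec_get_byte_to_note_map keys levels octaves intensities max_cnt (get_byte_to_note_map keys levels octaves intensities max_cnt)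

-- ===== LEMMAS AND PROOFS =====

def pvNotes (keys levels octaves intensities : List String) : List String :=
  keys.flatMap (fun k => levels.flatMap (fun l => octaves.flatMap (fun o => intensities.map (fun i => k ++ l ++ o ++ i))))

-- the canonical result both programs reach: entry j maps hex(j) to notes[j % len(notes)]
def pvVal (notes : List String) (j : Nat) : String := notes.getD (j % notes.length) ""
def pvCanon (notes : List String) (T : Nat) : List (String × String) :=
  (List.range T).map (fun (j : Nat) => (pvByteHex (j : Int), pvVal notes j))

lemma pvHexDigit_inj : ∀ a < 16, ∀ b < 16, pvHexDigit (a : Nat) = pvHexDigit (b : Nat) → a = b := by decide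

lemma pvByteHex_inj {i j : Nat} (hi : i < 256) (hj : j < 256)
    (h : pvByteHex (i : Int) = pvByteHex (j : Int)) : i = j := by
  have hd : ∀ m : Nat, PySem.Int.floordiv (m : Int) 16 = ((m / 16 : Nat) : Int) := fun m => by
    exact_mod_cast PySem.Int.floordiv_natCast m 16
  have hmm : ∀ m : Nat, PySem.Int.mod (m : Int) 16 = ((m % 16 : Nat) : Int) := fun m => by
    exact_mod_cast PySem.Int.mod_natCast m 16
  simp only [pvByteHex, hd, hmm] at h
  have h' := String.ofList_inj.mp h
  have h1 : pvHexDigit ((i / 16 : Nat) : Int) = pvHexDigit ((j / 16 : Nat) : Int) := by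
    simpa using congrArg (fun l => l.headI) h'
  have h2 : pvHexDigit ((i % 16 : Nat) : Int) = pvHexDigit ((j % 16 : Nat) : Int) := by
    simpa using congrArg (fun l => l.getLast?) h'
  have e1 := pvHexDigit_inj (i / 16) (by omega) (j / 16) (by omega) h1
  have e2 := pvHexDigit_inj (i % 16) (by omega) (j % 16) (by omega) h2
  omega

lemma pvCanon_succ (notes : List String) (T : Nat) :
    pvCanon notes (T + 1) = pvCanon notes T ++ [(pvByteHex (T : Int), pvVal notes T)] := by
  simp [pvCanon, List.range_succ]

lemma pvCanon_keys (notes : List String) (T : Nat) :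
    (PySem.Dict.mk (pvCanon notes T)).keys = (List.range T).map (fun (j : Nat) => pvByteHex (j : Int)) := by
  simp [pvCanon, PySem.Dict.keys, List.map_map, Function.comp]

lemma pvCanon_keys_nodup (notes : List String) {T : Nat} (hT : T ≤ 256) :
    (PySem.Dict.mk (pvCanon notes T)).keys.Nodup := by
  rw [pvCanon_keys]
  refine List.Nodup.map_on ?_ List.nodup_range
  intro x hx y hy h
  have hx' := List.mem_range.mp hx
  have hy' := List.mem_range.mp hy
  exact pvByteHex_inj (by omega) (by omega) h

lemma pvCanon_fresh (notes : List String) {T : Nat} (hT : T < 256) :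
    (PySem.Dict.mk (pvCanon notes T)).contains (pvByteHex (T : Int)) = false := by
  cases hc : (PySem.Dict.mk (pvCanon notes T)).contains (pvByteHex (T : Int)) with
  | false => rfl
  | true =>
    exfalso
    have hm := (PySem.Dict.contains_iff_mem_keys _ _).mp hc
    rw [pvCanon_keys] at hm
    obtain ⟨j, hj, hje⟩ := List.mem_map.mp hm
    have hjT := List.mem_range.mp hj
    have := pvByteHex_inj (by omega) hT hje
    omega

lemma pvCanon_getD (notes : List String) {j T : Nat} (hj : j < T) (hT : T ≤ 256) :
    (PySem.Dict.mk (pvCanon notes T)).getD (pvByteHex (j : Int)) "" = pvVal notes j := by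
  refine PySem.Dict.getD_of_mem_items _ ?_ (pvCanon_keys_nodup notes hT) ""
  exact List.mem_map.mpr ⟨j, List.mem_range.mpr hj, rfl⟩

lemma pvCanon_insert (notes : List String) {T : Nat} (hT : T < 256) (v : String) :
    (PySem.Dict.mk (pvCanon notes T)).insert (pvByteHex (T : Int)) v
      = PySem.Dict.mk (pvCanon notes T ++ [(pvByteHex (T : Int), v)]) := by
  apply PySem.Dict.ext
  rw [PySem.Dict.items_insert_of_not_contains _ _ (pvCanon_fresh notes hT)]

lemma pvVal_mod (notes : List String) (j : Nat) : pvVal notes (j % notes.length) = pvVal notes j := by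
  simp [pvVal, Nat.mod_mod_of_dvd]

lemma pvNotes_length (keys levels octaves intensities : List String) :
    (pvNotes keys levels octaves intensities).length
      = keys.length * levels.length * octaves.length * intensities.length := by
  simp [pvNotes, List.length_flatMap]
  ring

lemma pvNestedA (keys levels octaves intensities : List String) :
    keys.foldl (fun s elem1 =>
      levels.foldl (fun s elem2 =>
        octaves.foldl (fun s elem3 =>
          intensities.foldl (fun s elem4 =>
            (s.1.insert (pvByteHex s.2) (elem1 ++ elem2 ++ elem3 ++ elem4), s.2 + 1)) s) s) s)
      ((PySem.Dict.empty : PySem.Dict String String), (0 : Int))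
      = (pvNotes keys levels octaves intensities).foldl
          (fun s e => (s.1.insert (pvByteHex s.2) e, s.2 + 1))
          ((PySem.Dict.empty : PySem.Dict String String), (0 : Int)) := by
  simp [pvNotes, List.foldl_flatMap, List.foldl_map]

lemma pvPhase1 (notes : List String) (h256 : notes.length ≤ 256) :
    ∀ (suf pre : List String), notes = pre ++ suf →
      suf.foldl (fun s e => (s.1.insert (pvByteHex s.2) e, s.2 + 1))
        (PySem.Dict.mk (pvCanon notes pre.length), (pre.length : Int))
      = (PySem.Dict.mk (pvCanon notes notes.length), (notes.length : Int)) := by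
  intro suf
  induction suf with
  | nil => intro pre h; simp [h]
  | cons x rest ih =>
    intro pre h
    have hlen : pre.length < notes.length := by rw [h]; simp
    have hx : pvVal notes pre.length = x := by
      unfold pvVal
      rw [Nat.mod_eq_of_lt hlen, List.getD_eq_getElem?_getD, h,
        List.getElem?_append_right (Nat.le_refl _)]
      simp
    simp only [List.foldl_cons]
    rw [pvCanon_insert notes (by omega) x, ← hx, ← pvCanon_succ]
    have hrec := ih (pre ++ [x]) (by simp [h])
    simp only [List.length_append, List.length_cons, List.length_nil] at hrec
    have hcast : ((pre.length : Int) + 1) = ((pre.length + 1 : Nat) : Int) := by push_cast; ring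
    rw [hcast]
    exact hrec

-- generic flat-index fact: in a flatMap with constant block length M, entry m sits in
-- block m / M at offset m % M
lemma pvFlatIdx {α : Type} (f : α → List String) (M : Nat) (x₀ : α) :
    ∀ (xs : List α), (∀ x ∈ xs, (f x).length = M) →
      ∀ m, m < xs.length * M →
        (xs.flatMap f).getD m "" = (f (xs.getD (m / M) x₀)).getD (m % M) "" := by
  intro xs
  induction xs with
  | nil => intro _ m hm; simp at hm
  | cons x rest ih =>
    intro hM m hm
    have hMpos : 0 < M := by
      rcases Nat.eq_zero_or_pos M with h0 | h; · simp [h0] at hm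
      · exact h
    have hxlen : (f x).length = M := hM x (List.mem_cons_self)
    simp only [List.flatMap_cons]
    by_cases hlt : m < M
    · rw [List.getD_append _ _ _ m (by omega), Nat.div_eq_of_lt hlt, Nat.mod_eq_of_lt hlt]
      simp
    · rw [List.getD_append_right _ _ _ m (by omega), hxlen]
      have hrec := ih (fun y hy => hM y (List.mem_cons_of_mem x hy)) (m - M)
        (by simp only [List.length_cons, Nat.succ_mul] at hm; omega)
      rw [hrec]
      have hsplit : m = (m - M) + M := by omega
      have hdiv : m / M = (m - M) / M + 1 := by
        conv_lhs => rw [hsplit]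
        exact Nat.add_div_right _ hMpos
      have hmod : m % M = (m - M) % M := by
        conv_lhs => rw [hsplit]
        exact Nat.add_mod_right _ _
      rw [hdiv, hmod]
      simp

-- getD-through-map fact for the innermost level
lemma pvGetD_map (f : String → String) (xs : List String) (r : Nat) (h : r < xs.length) :
    (xs.map f).getD r "" = f (xs.getD r "") := by
  rw [List.getD_eq_getElem?_getD, List.getElem?_map, List.getD_eq_getElem?_getD,
    List.getElem?_eq_getElem h]
  simp

-- the mixed-radix decode of j < N picks exactly notes[j]
lemma pvDecode (keys levels octaves intensities : List String)
    (hpos : 0 < keys.length * levels.length * octaves.length * intensities.length)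
    (j : Nat) (hj : j < keys.length * levels.length * octaves.length * intensities.length) :
    (pvNotes keys levels octaves intensities).getD j ""
      = keys.getD (j / intensities.length / octaves.length / levels.length) ""
        ++ levels.getD (j / intensities.length / octaves.length % levels.length) ""
        ++ octaves.getD (j / intensities.length % octaves.length) ""
        ++ intensities.getD (j % intensities.length) "" := by
  have hlnz : 0 < levels.length := by
    rcases Nat.eq_zero_or_pos levels.length with h0 | h; · simp [h0] at hpos
    · exact h
  have honz : 0 < octaves.length := by
    rcases Nat.eq_zero_or_pos octaves.length with h0 | h; · simp [h0] at hpos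
    · exact h
  have hinz : 0 < intensities.length := by
    rcases Nat.eq_zero_or_pos intensities.length with h0 | h; · simp [h0] at hpos
    · exact h
  have hM1 : 0 < levels.length * octaves.length * intensities.length := by positivity
  have hM2 : 0 < octaves.length * intensities.length := by positivity
  have h1 := pvFlatIdx (fun k => levels.flatMap (fun l => octaves.flatMap (fun o => intensities.map (fun i => k ++ l ++ o ++ i))))
    (levels.length * octaves.length * intensities.length) "" keys
    (fun k _ => by simp [List.length_flatMap, mul_assoc])
    j (by rw [show keys.length * (levels.length * octaves.length * intensities.length)
        = keys.length * levels.length * octaves.length * intensities.length from by ring]; exact hj)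
  have h2 := pvFlatIdx (fun l => octaves.flatMap (fun o => intensities.map (fun i => (keys.getD (j / (levels.length * octaves.length * intensities.length)) "") ++ l ++ o ++ i)))
    (octaves.length * intensities.length) "" levels
    (fun l _ => by simp [List.length_flatMap, mul_assoc])
    (j % (levels.length * octaves.length * intensities.length))
    (by rw [show levels.length * (octaves.length * intensities.length)
        = levels.length * octaves.length * intensities.length from by ring]; exact Nat.mod_lt _ hM1)
  have h3 := pvFlatIdx (fun o => intensities.map (fun i => (keys.getD (j / (levels.length * octaves.length * intensities.length)) "") ++ (levels.getD (j % (levels.length * octaves.length * intensities.length) / (octaves.length * intensities.length)) "") ++ o ++ i))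
    intensities.length "" octaves
    (fun o _ => by simp)
    (j % (levels.length * octaves.length * intensities.length) % (octaves.length * intensities.length))
    (Nat.mod_lt _ hM2)
  have h4 := pvGetD_map (fun i => (keys.getD (j / (levels.length * octaves.length * intensities.length)) "") ++ (levels.getD (j % (levels.length * octaves.length * intensities.length) / (octaves.length * intensities.length)) "") ++ (octaves.getD (j % (levels.length * octaves.length * intensities.length) % (octaves.length * intensities.length) / intensities.length) "") ++ i)
    intensities
    (j % (levels.length * octaves.length * intensities.length) % (octaves.length * intensities.length) % intensities.length)
    (Nat.mod_lt _ hinz)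
  beta_reduce at h1 h2 h3
  rw [pvNotes, h1, h2, h3, h4]
  have e1 : j / (levels.length * octaves.length * intensities.length)
      = j / intensities.length / octaves.length / levels.length := by
    rw [Nat.div_div_eq_div_mul, Nat.div_div_eq_div_mul]
    congr 1
    ring
  have e2 : j % (levels.length * octaves.length * intensities.length) / (octaves.length * intensities.length)
      = j / intensities.length / octaves.length % levels.length := by
    rw [show levels.length * octaves.length * intensities.length
        = (octaves.length * intensities.length) * levels.length from by ring,
      Nat.mod_mul_right_div_self, Nat.div_div_eq_div_mul, mul_comm octaves.length intensities.length]
  have e3 : j % (levels.length * octaves.length * intensities.length) % (octaves.length * intensities.length)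
      = j % (octaves.length * intensities.length) :=
    Nat.mod_mod_of_dvd _ ⟨levels.length, by ring⟩
  have e4 : j % (octaves.length * intensities.length) / intensities.length
      = j / intensities.length % octaves.length := by
    rw [mul_comm octaves.length intensities.length, Nat.mod_mul_right_div_self]
  have e5 : j % (octaves.length * intensities.length) % intensities.length
      = j % intensities.length :=
    Nat.mod_mod_of_dvd _ ⟨octaves.length, by ring⟩
  rw [e3, e4, e5, e1, e2]

-- the Int-level loop body of B computes pvVal at every Nat counter
lemma pvDecodeNote_eq (keys levels octaves intensities : List String)
    (hpos : 0 < (pvNotes keys levels octaves intensities).length) (m : Nat) :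
    pvDecodeNote keys levels octaves intensities
        (((pvNotes keys levels octaves intensities).length : Nat) : Int) (m : Int)
      = pvVal (pvNotes keys levels octaves intensities) m := by
  have hlen := pvNotes_length keys levels octaves intensities
  simp only [pvDecodeNote, PySem.Int.mod_natCast, PySem.Int.floordiv_natCast,
    PySem.List.pyGet?_natCast]
  simp only [← List.getD_eq_getElem?_getD]
  have hpos' : 0 < keys.length * levels.length * octaves.length * intensities.length := by
    omega
  have hj : m % (pvNotes keys levels octaves intensities).length
      < keys.length * levels.length * octaves.length * intensities.length := by
    have := Nat.mod_lt m hpos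
    omega
  have hdec := pvDecode keys levels octaves intensities hpos'
    (m % (pvNotes keys levels octaves intensities).length) hj
  unfold pvVal
  rw [hdec]

lemma pvPhase2A (notes : List String) (hpos : 0 < notes.length) :
    ∀ (u t : Nat), notes.length ≤ t → t + u ≤ 256 →
      (PySem.List.pyRange (t : Int) ((t : Int) + (u : Int)) 1).foldl
        (fun d cnt => d.insert (pvByteHex cnt)
          (d.getD (pvByteHex (PySem.Int.mod cnt ((notes.length : Nat) : Int))) ""))
        (PySem.Dict.mk (pvCanon notes t))
      = PySem.Dict.mk (pvCanon notes (t + u)) := by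
  intro u
  induction u with
  | zero => intro t _ _; simp
  | succ u ih =>
    intro t ht hle
    have hcast : ((t : Int) + ((u + 1 : Nat) : Int)) = ((t : Int) + (u : Int)) + 1 := by push_cast; ring
    rw [hcast, PySem.List.pyRange_one_succ_right (by omega), List.foldl_append,
      ih t ht (by omega)]
    simp only [List.foldl_cons, List.foldl_nil]
    have hc : ((t : Int) + (u : Int)) = ((t + u : Nat) : Int) := by push_cast; ring
    rw [hc, PySem.Int.mod_natCast]
    rw [pvCanon_getD notes (j := (t + u) % notes.length)
      (by have := Nat.mod_lt (t + u) (by omega); omega) (by omega)]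
    rw [pvVal_mod, pvCanon_insert notes (by omega) _, ← pvCanon_succ]
    rfl

lemma pvPhase2Alt (keys levels octaves intensities : List String)
    (hpos : 0 < (pvNotes keys levels octaves intensities).length) :
    ∀ (u t : Nat), t + u ≤ 256 →
      (PySem.List.pyRange (t : Int) ((t : Int) + (u : Int)) 1).foldl
        (fun d c => d.insert (pvByteHex c)
          (pvDecodeNote keys levels octaves intensities
            (((pvNotes keys levels octaves intensities).length : Nat) : Int) c))
        (PySem.Dict.mk (pvCanon (pvNotes keys levels octaves intensities) t))
      = PySem.Dict.mk (pvCanon (pvNotes keys levels octaves intensities) (t + u)) := by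
  intro u
  induction u with
  | zero => intro t _; simp
  | succ u ih =>
    intro t hle
    have hcast : ((t : Int) + ((u + 1 : Nat) : Int)) = ((t : Int) + (u : Int)) + 1 := by push_cast; ring
    rw [hcast, PySem.List.pyRange_one_succ_right (by omega), List.foldl_append,
      ih t (by omega)]
    simp only [List.foldl_cons, List.foldl_nil]
    have hc : ((t : Int) + (u : Int)) = ((t + u : Nat) : Int) := by push_cast; ring
    rw [hc, pvDecodeNote_eq keys levels octaves intensities hpos (t + u),
      pvCanon_insert _ (by omega) _, ← pvCanon_succ]
    rfl

lemma pvAEq (keys levels octaves intensities : List String) (max_cnt : Int) :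
    get_byte_to_note_map keys levels octaves intensities max_cnt
      = (let s := (pvNotes keys levels octaves intensities).foldl
            (fun s e => (s.1.insert (pvByteHex s.2) e, s.2 + 1))
            ((PySem.Dict.empty : PySem.Dict String String), (0 : Int));
         ((PySem.List.pyRange s.2 (max_cnt + 1) 1).foldl (fun d cnt =>
            d.insert (pvByteHex cnt) (d.getD (pvByteHex (PySem.Int.mod cnt s.2)) "")) s.1).items) := by
  simp only [get_byte_to_note_map]
  rw [pvNestedA]

lemma pvAltEq (keys levels octaves intensities : List String) (max_cnt : Int) :
    get_byte_to_note_map_alt keys levels octaves intensities max_cnt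
      = ((PySem.List.pyRange 0 (max (max_cnt + 1) (((pvNotes keys levels octaves intensities).length : Nat) : Int)) 1).foldl
          (fun d c => d.insert (pvByteHex c)
            (pvDecodeNote keys levels octaves intensities
              (((pvNotes keys levels octaves intensities).length : Nat) : Int) c))
          (PySem.Dict.empty : PySem.Dict String String)).items := by
  simp only [get_byte_to_note_map_alt]
  have hn : ((keys.length : Int) * (levels.length : Int) * (octaves.length : Int) * (intensities.length : Int))
      = (((pvNotes keys levels octaves intensities).length : Nat) : Int) := by
    rw [pvNotes_length]; push_cast; ring
  rw [hn]

lemma pvEmptyDict (notes : List String) : (PySem.Dict.empty : PySem.Dict String String) = PySem.Dict.mk (pvCanon notes 0) := rfl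

-- ===== VERDICT (by name: the statement is the Claim_ definition above) =====
theorem get_byte_to_note_map_spec : Claim_equal_get_byte_to_note_map := by
  intro keys levels octaves intensities max_cnt hdom hpre
  unfold Spec_get_byte_to_note_map
  obtain ⟨hle, hmc, hor⟩ := hpre
  rw [pvAEq, pvAltEq]
  have hlen := pvNotes_length keys levels octaves intensities
  set notes := pvNotes keys levels octaves intensities with hnotes
  have h256 : notes.length ≤ 256 := by omega
  have h1 := pvPhase1 notes h256 notes [] rfl
  simp only [List.length_nil, Nat.cast_zero] at h1
  rw [pvEmptyDict notes, h1]
  simp only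
  by_cases hpos : 0 < notes.length
  · by_cases hsmall : max_cnt + 1 ≤ (notes.length : Int)
    · have h0 : ((max_cnt + 1) - ((notes.length : Nat) : Int)).toNat = 0 := by omega
      have hA : PySem.List.pyRange ((notes.length : Nat) : Int) (max_cnt + 1) 1 = [] := by
        rw [PySem.List.pyRange_one, h0]
        simp
      rw [hA]
      have hB := pvPhase2Alt keys levels octaves intensities (by rw [← hnotes]; omega) notes.length 0 (by omega)
      rw [← hnotes] at hB
      simp only [Nat.cast_zero, zero_add] at hB
      rw [max_eq_right hsmall, hB]
      simp only [List.foldl_nil]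
    · rw [not_le] at hsmall
      have hu : max_cnt + 1 = ((notes.length : Nat) : Int) + (((max_cnt + 1 - (notes.length : Nat)).toNat : Nat) : Int) := by omega
      set u := (max_cnt + 1 - (notes.length : Nat)).toNat with hudef
      have hsum : notes.length + u ≤ 256 := by omega
      have hB := pvPhase2Alt keys levels octaves intensities (by rw [← hnotes]; omega) (notes.length + u) 0 (by omega)
      rw [← hnotes] at hB
      simp only [Nat.cast_zero, zero_add] at hB
      have htop : max (max_cnt + 1) ((notes.length : Nat) : Int) = ((notes.length + u : Nat) : Int) := by
        rw [max_eq_left (by omega)]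
        push_cast
        omega
      rw [htop, hB, hu, pvPhase2A notes hpos u notes.length (le_refl _) hsum]
  · have hZ : notes.length = 0 := by omega
    have hneg : max_cnt < 0 := by omega
    have h0 : ((max_cnt + 1) - ((notes.length : Nat) : Int)).toNat = 0 := by omega
    have hA : PySem.List.pyRange ((notes.length : Nat) : Int) (max_cnt + 1) 1 = [] := by
      rw [PySem.List.pyRange_one, h0]
      simp
    have h0' : ((max (max_cnt + 1) ((notes.length : Nat) : Int)) - 0).toNat = 0 := by
      simp only [hZ]
      omega
    have hB : PySem.List.pyRange 0 (max (max_cnt + 1) ((notes.length : Nat) : Int)) 1 = [] := by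
      rw [PySem.List.pyRange_one, h0']
      simp
    rw [hA, hB]
    simp only [List.foldl_nil]
    rw [hZ]
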